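-- pv_equiv track=rewrite | github.com/Hamilton-College/old-Shaker-Manifesto | image_files.py | div_type
-- ===== SOURCE A (Python) =====
-- def div_type(text):
-- 	article = 1
-- 	string_out = ""
-- 	counter = 0
-- 	# Loops through text to catch all types in a div tag
-- 	for i in range(0, len(text)):
-- 		if counter > 0:
-- 			counter -= 1
-- 		elif article == 1 and text[i:i + 6] == "type=\"":
-- 			article = 21
-- 			counter = 5
-- 		elif article == 21 and text[i] == "\"":
-- 			break
-- 		elif article == 21:
-- 			string_out += text[i].lower()
-- 	return string_out
-- ===== SOURCE B (Python) =====
-- def div_type(text):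
--     idx = text.find('type="')
--     if idx == -1:
--         return ""
--     start = idx + 6
--     end = text.find('"', start)
--     if end == -1:
--         return text[start:].lower()
--     return text[start:end].lower()
-- ===== Notes on version B (the rewrite author's own statement) =====
-- stated objective: simpler
-- what changed: Replaced the char-by-char article/counter state machine with two str.find calls and one lowered slice: locate the attribute marker, then slice up to the next double quote (or to the end if none).
import Mathlib
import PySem

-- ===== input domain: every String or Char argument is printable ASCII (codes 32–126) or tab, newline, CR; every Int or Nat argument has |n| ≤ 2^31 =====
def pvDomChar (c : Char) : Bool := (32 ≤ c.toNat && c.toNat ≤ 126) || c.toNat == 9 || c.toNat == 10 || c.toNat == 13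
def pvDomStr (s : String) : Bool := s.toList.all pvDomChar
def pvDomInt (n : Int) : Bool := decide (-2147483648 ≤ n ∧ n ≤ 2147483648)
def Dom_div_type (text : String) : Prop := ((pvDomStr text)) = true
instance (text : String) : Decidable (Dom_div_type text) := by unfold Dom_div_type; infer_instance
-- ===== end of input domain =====

-- B replaces A's char-by-char article/counter state machine by two str.find calls and one
-- lowered slice (simpler decomposition, same result).

-- ===== PORT A =====
-- A's for-loop (with break) ported as structural recursion on the remaining suffix of the
-- text; for the suffix c :: rest starting at index i, (c :: rest).take 6 is exactly
-- Python's text[i:i+6]; the state variables article / string_out / counter are carried.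
def divTypeLoop : List Char → Int → List Char → Int → List Char
  | [], _, out, _ => out
  | c :: rest, article, out, counter =>
    if counter > 0 then divTypeLoop rest article out (counter - 1)
    else if article = 1 ∧ (c :: rest).take 6 = "type=\"".toList then
      divTypeLoop rest 21 out 5
    else if article = 21 ∧ c = '"' then out           -- break
    else if article = 21 then
      divTypeLoop rest article (out ++ [PySem.Chars.lowerChar c]) counter
    else divTypeLoop rest article out counter

def div_type (text : String) : String :=
  String.ofList (divTypeLoop text.toList 1 [] 0)

-- ===== PORT B =====
def div_type_alt (text : String) : String :=
  let idx := PySem.Str.find text "type=\""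
  if idx = -1 then ""
  else
    let start := idx + 6
    let stop := PySem.Str.findFrom text "\"" start
    if stop = -1 then PySem.Str.lower (PySem.Str.slice text (some start) none)
    else PySem.Str.lower (PySem.Str.slice text (some start) (some stop))

-- ===== PRECONDITION & SPEC =====
def Spec_div_type (text : String) (out : String) : Prop := out = div_type_alt text
instance (text : String) (out : String) : Decidable (Spec_div_type text out) := by unfold Spec_div_type; infer_instance

-- ===== CLAIM (what is proved, stated in full; the proofs are below) =====
def Claim_equal_div_type : Prop := ∀ (text : String), Dom_div_type text → Spec_div_type text (div_type text)

-- ===== LEMMAS AND PROOFS =====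

theorem pvPat_len : ("type=\"".toList).length = 6 := by decide

-- skipping k characters with counter = k
theorem divTypeLoop_skip : ∀ (k : ℕ) (cs : List Char) (art : Int) (out : List Char),
    divTypeLoop cs art out (k : Int) = divTypeLoop (cs.drop k) art out 0 := by
  intro k
  induction k with
  | zero => intro cs art out; simp
  | succ k ih =>
    intro cs art out
    cases cs with
    | nil => simp [divTypeLoop]
    | cons c rest =>
      have step : divTypeLoop (c :: rest) art out ((k + 1 : ℕ) : Int)
          = divTypeLoop rest art out (((k + 1 : ℕ) : Int) - 1) := by
        simp [divTypeLoop]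
      rw [step, show (((k + 1 : ℕ) : Int) - 1) = (k : Int) by push_cast; ring, ih,
        List.drop_succ_cons]

-- the collecting phase: article = 21, counter = 0
theorem divTypeLoop_phase21 : ∀ (cs out : List Char),
    divTypeLoop cs 21 out 0 =
      out ++ (cs.takeWhile (fun c => c != '"')).map PySem.Chars.lowerChar := by
  intro cs
  induction cs with
  | nil => intro out; simp [divTypeLoop]
  | cons c rest ih =>
    intro out
    by_cases hc : c = '"'
    · simp [divTypeLoop, hc]
    · have step : divTypeLoop (c :: rest) 21 out 0
          = divTypeLoop rest 21 (out ++ [PySem.Chars.lowerChar c]) 0 := by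
        simp [divTypeLoop, hc]
      have hb : (c != '"') = true := by simp [hc]
      rw [step, ih, List.takeWhile_cons, hb]
      simp

-- the searching phase when the pattern occurs nowhere
theorem divTypeLoop_phase1_none : ∀ (cs out : List Char),
    (∀ j : ℕ, ¬ ("type=\"".toList <+: cs.drop j)) →
    divTypeLoop cs 1 out 0 = out := by
  intro cs
  induction cs with
  | nil => intro out _; simp [divTypeLoop]
  | cons c rest ih =>
    intro out h
    have h0 : ¬ ((c :: rest).take 6 = "type=\"".toList) := by
      intro he
      exact h 0 (by rw [List.drop_zero, List.prefix_iff_eq_take, pvPat_len, he])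
    have step : divTypeLoop (c :: rest) 1 out 0 = divTypeLoop rest 1 out 0 := by
      simp only [divTypeLoop]
      rw [if_neg (by norm_num : ¬((0 : Int) > 0)), if_neg (fun hand => h0 hand.2),
        if_neg (by norm_num : ¬((1 : Int) = 21 ∧ c = '"')),
        if_neg (by norm_num : ¬((1 : Int) = 21))]
    rw [step]
    exact ih out (fun j => by simpa [List.drop_succ_cons] using h (j + 1))

-- the searching phase with the first occurrence at index n
theorem divTypeLoop_phase1_found : ∀ (n : ℕ) (cs out : List Char),
    (∀ i : ℕ, i < n → ¬ ("type=\"".toList <+: cs.drop i)) →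
    ("type=\"".toList <+: cs.drop n) →
    divTypeLoop cs 1 out 0 = divTypeLoop (cs.drop (n + 6)) 21 out 0 := by
  intro n
  induction n with
  | zero =>
    intro cs out _ hp
    rw [List.drop_zero] at hp
    cases cs with
    | nil => simp [List.prefix_iff_eq_take] at hp
    | cons c rest =>
      have ht : (c :: rest).take 6 = "type=\"".toList := by
        rw [List.prefix_iff_eq_take, pvPat_len] at hp
        exact hp.symm
      have step : divTypeLoop (c :: rest) 1 out 0 = divTypeLoop rest 21 out 5 := by
        simp [divTypeLoop, ht]
      have hdrop : (c :: rest).drop (0 + 6) = rest.drop 5 := by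
        rw [Nat.zero_add, show (6 : ℕ) = 5 + 1 from rfl, List.drop_succ_cons]
      rw [step, show (5 : Int) = ((5 : ℕ) : Int) by norm_num, divTypeLoop_skip, hdrop]
  | succ n ih =>
    intro cs out hmin hp
    cases cs with
    | nil => simp [List.prefix_iff_eq_take] at hp
    | cons c rest =>
      have h0 : ¬ ((c :: rest).take 6 = "type=\"".toList) := by
        intro he
        exact hmin 0 (by omega)
          (by rw [List.drop_zero, List.prefix_iff_eq_take, pvPat_len, he])
      have step : divTypeLoop (c :: rest) 1 out 0 = divTypeLoop rest 1 out 0 := by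
        simp only [divTypeLoop]
        rw [if_neg (by norm_num : ¬((0 : Int) > 0)), if_neg (fun hand => h0 hand.2),
          if_neg (by norm_num : ¬((1 : Int) = 21 ∧ c = '"')),
          if_neg (by norm_num : ¬((1 : Int) = 21))]
      have hdrop : (c :: rest).drop (n + 1 + 6) = rest.drop (n + 6) := by
        rw [show (n + 1 + 6 : ℕ) = (n + 6) + 1 by omega, List.drop_succ_cons]
      rw [step, hdrop]
      exact ih rest out
        (fun i hi => by simpa [List.drop_succ_cons] using hmin (i + 1) (by omega))
        (by simpa [List.drop_succ_cons] using hp)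

theorem singleton_prefix_iff (a : Char) (l : List Char) :
    [a] <+: l ↔ l.head? = some a := by
  cases l with
  | nil => simp
  | cons b t => simp [List.cons_prefix_cons, eq_comm]

theorem singleton_infix_of_mem (a : Char) (l : List Char) (h : a ∈ l) :
    [a] <:+: l := by
  obtain ⟨s, t, rfl⟩ := List.append_of_mem h
  exact ⟨s, t, by simp⟩

theorem takeWhile_eq_take_of (p : Char → Bool) : ∀ (m : ℕ) (l : List Char),
    (∀ i : ℕ, i < m → ∀ x, l[i]? = some x → p x = true) →
    (∀ x, l[m]? = some x → p x = false) →
    l.takeWhile p = l.take m := by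
  intro m
  induction m with
  | zero =>
    intro l _ h2
    cases l with
    | nil => simp
    | cons c t =>
      have := h2 c (by simp)
      simp [this]
  | succ m ih =>
    intro l h1 h2
    cases l with
    | nil => simp
    | cons c t =>
      have hc : p c = true := h1 0 (by omega) c (by simp)
      rw [List.take_succ_cons, List.takeWhile_cons, hc, if_pos rfl,
        ih t (fun i hi x hx => h1 (i + 1) (by omega) x (by simpa using hx))
          (fun x hx => h2 x (by simpa using hx))]

-- the scan up to the first '"' is the prefix up to find R ['"']
theorem quote_takeWhile (R : List Char) (hnn : 0 ≤ PySem.Chars.find R ['"']) :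
    R.takeWhile (fun c => c != '"') = R.take ((PySem.Chars.find R ['"']).toNat) := by
  obtain ⟨hpre, hmin⟩ := PySem.Chars.find_spec hnn
  apply takeWhile_eq_take_of
  · intro i hi x hx
    have hne : R[i]? ≠ some '"' := by
      intro hh
      exact hmin i hi ((singleton_prefix_iff '"' _).mpr (by rw [List.head?_drop]; exact hh))
    simp only [bne_iff_ne, ne_eq]
    rintro rfl
    exact hne hx
  · intro x hx
    have hhd : R[(PySem.Chars.find R ['"']).toNat]? = some '"' := by
      rw [← List.head?_drop]
      exact (singleton_prefix_iff '"' _).mp hpre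
    rw [hhd] at hx
    cases hx
    simp

theorem noquote_takeWhile (R : List Char) (h : PySem.Chars.find R ['"'] = -1) :
    R.takeWhile (fun c => c != '"') = R := by
  apply List.takeWhile_eq_self_iff.mpr
  intro x hx
  simp only [bne_iff_ne, ne_eq]
  rintro rfl
  exact (PySem.Chars.find_eq_neg_one_iff R ['"']).mp h (singleton_infix_of_mem _ _ hx)

theorem div_type_spec_aux (text : String) :
    div_type text = div_type_alt text := by
  simp only [div_type, div_type_alt, PySem.Str.find_eq, PySem.Str.findFrom_eq]
  rcases eq_or_ne (PySem.Chars.find text.toList "type=\"".toList) (-1) with hf | hf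
  · -- pattern absent: A collects nothing, B returns ""
    rw [if_pos hf]
    have hninf : ¬ ("type=\"".toList <:+: text.toList) :=
      (PySem.Chars.find_eq_neg_one_iff _ _).mp hf
    have hno : ∀ j : ℕ, ¬ ("type=\"".toList <+: text.toList.drop j) := by
      intro j hj
      exact hninf (hj.isInfix.trans (List.drop_suffix j text.toList).isInfix)
    rw [divTypeLoop_phase1_none text.toList [] hno]
  · -- pattern found
    have hnn : 0 ≤ PySem.Chars.find text.toList "type=\"".toList := by
      have := PySem.Chars.neg_one_le_find text.toList "type=\"".toList
      omega
    obtain ⟨hpre, hmin⟩ := PySem.Chars.find_spec hnn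
    rw [if_neg hf, divTypeLoop_phase1_found _ _ _ hmin hpre, divTypeLoop_phase21]
    have hlen : (PySem.Chars.find text.toList "type=\"".toList).toNat + 6
        ≤ text.toList.length := by
      have h1 := hpre.length_le
      rw [pvPat_len, List.length_drop] at h1
      have h2 : (PySem.Chars.find text.toList "type=\"".toList : Int) ≤ text.toList.length :=
        PySem.Chars.find_le_length _ _
      omega
    have hstart : PySem.Chars.find text.toList "type=\"".toList + 6
        = (((PySem.Chars.find text.toList "type=\"".toList).toNat + 6 : ℕ) : Int) := by
      omega
    rw [hstart, show ("\"" : String).toList = ['"'] from by decide,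
      PySem.Chars.findFrom_natCast _ _ _ hlen]
    rcases eq_or_ne (PySem.Chars.find
        (text.toList.drop ((PySem.Chars.find text.toList "type=\"".toList).toNat + 6))
        ['"']) (-1) with hq | hq
    · -- no closing quote: collect/slice to the end of the text
      rw [if_pos hq, if_pos rfl, noquote_takeWhile _ hq]
      apply String.toList_inj.mp
      rw [PySem.Str.toList_lower, PySem.Str.toList_slice, PySem.Chars.slice_eq_listSlice,
        PySem.List.slice_from_natCast]
      simp [PySem.Chars.lower]
    · -- closing quote found: collect/slice up to it
      have hqnn : 0 ≤ PySem.Chars.find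
          (text.toList.drop ((PySem.Chars.find text.toList "type=\"".toList).toNat + 6))
          ['"'] := by
        have := PySem.Chars.neg_one_le_find
          (text.toList.drop ((PySem.Chars.find text.toList "type=\"".toList).toNat + 6))
          ['"']
        omega
      have hqfind : PySem.Chars.find
          (text.toList.drop ((PySem.Chars.find text.toList "type=\"".toList).toNat + 6))
          ['"']
          = ((PySem.Chars.find
              (text.toList.drop ((PySem.Chars.find text.toList "type=\"".toList).toNat + 6))
              ['"']).toNat : Int) := (Int.toNat_of_nonneg hqnn).symm
      rw [if_neg hq, quote_takeWhile _ hqnn, hqfind,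
        if_neg (by intro hcon; omega)]
      apply String.toList_inj.mp
      rw [PySem.Str.toList_lower, PySem.Str.toList_slice, PySem.Chars.slice_eq_listSlice,
        PySem.List.slice_natCast_add]
      simp [PySem.Chars.lower]
      omega

-- ===== VERDICT (by name: the statement is the Claim_ definition above) =====
theorem div_type_spec : Claim_equal_div_type := by
  intro text _
  unfold Spec_div_type
  exact div_type_spec_aux text
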